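/- GENERATED by tools/from_farm_form.py from prooffarm-gif/accepted/DGifGetRecordType.2/Proof.lean (a worked proof of the farm's unit `DGifGetRecordType.2`,
   accepted by the verdict) — do not edit. -/
import Gif.Spec.Units.DGifGetRecordType_2
import Gif.Spec.AllSegs
import Gif.Spec.Proved.DGifGetRecordType_2_Lemmas

open X86 X86.User Asan ProgX.Base ProgX.Base.Spec Gif.Spec

/-!
  `DGifGetRecordType.2` (0x108c3e … 0x108cb8, 27 instructions; dgif_lib.c:342-358): the `switch (Buf)` of `DGifGetRecordType`, a body
  segment of a protected function: four arms, five check sites, no call. One walk (`rt2_seg`, Lemmas.lean) from `AfterRead` at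
  0x108c3e to `Done` at 0x108bf5; the exit assertion of each arm is built by `rt2_done_ok` / `rt2_done_err` from the stores of the arm
  (`store_stack`, `store_gif` of Gif/Spec/FrameCarry.lean, and `rt2_store_out` for the store through the out-pointer `Type`).
-/

/-- Segment 2 of `DGifGetRecordType` takes `AfterRead` at 0x108c3e to `Done` at 0x108bf5. -/
theorem Gif.Spec.Proved.DGifGetRecordType_2_ok : Gif.Spec.DGifGetRecordType_2.Statement := by
  intro Lay hLay μ hμ u₀ hcode h_asan_store4_noabort H rest frames F R e ret v hat
  -- 0x108c3e … 0x108bf5, all four arms of the switch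
  exact Gif.Spec.DGifGetRecordType_2.rt2_seg Lay hLay μ hμ u₀ hcode H rest frames F R e ret h_asan_store4_noabort v hat
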